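-- pv_equiv track=rewrite | github.com/kildegaard/fcen | python-UNSAM-2020/semana_6/random_walk.py | long_caminata
-- ===== SOURCE A (Python) =====
-- def long_caminata(caminatas: list, calcula_max: bool) -> int:
--     """
--     Función que devuelve el índice de la caminata que más (o menos) se aparta del camino central
--
--     Args:
--         caminatas (list): lista de ndarray con las n caminatas realizadas al azar
--         calcula_max (bool, optional): selector de si calculo máximo o mínimo. Defaults to True.
--
--     Returns:
--         int: Retorna el índice de la lista que cumple lo pedido
--     """
--     indice = 0
--     alejamiento = 0
--     for ncamin, caminata in enumerate(caminatas):
--         cam = [abs(elemento) for elemento in caminata]  # Genero lista de valores absolutos para comparar más fácilmente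
--
--         if calcula_max:  # Entro acá (por default) para calcular el máximo apartamiento
--             if max(cam) >= alejamiento:
--                 alejamiento = max(cam)
--                 indice = ncamin
--         else:  # Entro acá si quiero calcular el mínimo apartamiento
--             if ncamin == 0:  # Entro acá solo la primera vez
--                 alejamiento = max(cam)
--                 continue
--             if max(cam) < alejamiento:
--                 alejamiento = max(cam)
--                 indice = ncamin
--     return indice
-- ===== SOURCE B (Python) =====
-- def long_caminata(caminatas: list, calcula_max: bool) -> int:
--     peaks = [max(abs(e) for e in c) for c in caminatas]
--     if not peaks:
--         return 0
--     if calcula_max: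
--         return len(peaks) - 1 - peaks[::-1].index(max(peaks))
--     return peaks.index(min(peaks))
-- ===== Notes on version B (the rewrite author's own statement) =====
-- stated objective: simpler
-- what changed: A's single fused loop tracking (index, best-deviation) state with an ncamin==0 special case is replaced by two staged reductions over a peaks table: first the extreme VALUE (max/min of the peaks), then a positional search for that value (reversed-list .index giving A's last-occurrence tie-break for the max, plain .index giving the first-occurrence minimum).
import Mathlib
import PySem

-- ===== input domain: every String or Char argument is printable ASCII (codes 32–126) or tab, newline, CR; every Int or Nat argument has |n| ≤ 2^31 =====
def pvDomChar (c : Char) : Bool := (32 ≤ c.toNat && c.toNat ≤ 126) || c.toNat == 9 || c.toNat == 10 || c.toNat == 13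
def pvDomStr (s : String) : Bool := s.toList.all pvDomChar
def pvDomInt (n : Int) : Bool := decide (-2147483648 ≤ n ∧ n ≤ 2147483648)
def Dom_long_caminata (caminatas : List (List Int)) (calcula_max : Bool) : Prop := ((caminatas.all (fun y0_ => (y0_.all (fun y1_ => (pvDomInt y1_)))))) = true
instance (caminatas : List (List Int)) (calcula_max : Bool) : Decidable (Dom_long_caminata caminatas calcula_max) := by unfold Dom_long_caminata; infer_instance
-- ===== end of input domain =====

-- B replaces A's fused (index, best)-tracking loop by two staged reductions: first the best peak VALUE (max/min), then a positional search for it (reversed-list .index for last occurrence, plain .index for first); objective: simpler decomposition.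


-- ===== PORT A =====
def long_caminata (caminatas : List (List Int)) (calcula_max : Bool) : Int :=
  (List.foldl (fun (st : Int × Int) (p : Int × List Int) =>
      let cam := p.2.map (fun elemento => |elemento|)
      let m := (PySem.List.max? cam (fun x => x)).getD 0   -- max(cam); empty cam (ValueError) excluded by Pre_
      if calcula_max then
        if m ≥ st.2 then (p.1, m) else st
      else if p.1 = 0 then (st.1, m)
      else if m < st.2 then (p.1, m) else st)
    ((0 : Int), (0 : Int)) (PySem.List.enumerate caminatas)).1

-- ===== PORT B =====
def long_caminata_alt (caminatas : List (List Int)) (calcula_max : Bool) : Int :=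
  let peaks := caminatas.map (fun c => (PySem.List.max? (c.map (fun e => |e|)) (fun x => x)).getD 0)
  if peaks = [] then 0
  else if calcula_max then
    -- len(peaks) - 1 - peaks[::-1].index(max(peaks))
    (peaks.length : Int) - 1 -
      (((PySem.List.index? ((PySem.List.slice? peaks none none (-1)).getD [])
          ((PySem.List.max? peaks (fun x => x)).getD 0)).getD 0 : Nat) : Int)
  else
    -- peaks.index(min(peaks))
    (((PySem.List.index? peaks ((PySem.List.min? peaks (fun x => x)).getD 0)).getD 0 : Nat) : Int)

-- ===== PRECONDITION & SPEC =====
-- Pre_ excludes inputs containing an empty walk: Python's max of an empty sequence raises ValueError there (in A and in B alike).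
def Pre_long_caminata (caminatas : List (List Int)) (calcula_max : Bool) : Prop :=
  ∀ c ∈ caminatas, c ≠ []
instance (caminatas : List (List Int)) (calcula_max : Bool) : Decidable (Pre_long_caminata caminatas calcula_max) := by unfold Pre_long_caminata; infer_instance
def pvWitness_long_caminata : List (List Int) × Bool := ([[1, -3], [2], [0, 3]], true)

def Spec_long_caminata (caminatas : List (List Int)) (calcula_max : Bool) (out : Int) : Prop := out = long_caminata_alt caminatas calcula_max
instance (caminatas : List (List Int)) (calcula_max : Bool) (out : Int) : Decidable (Spec_long_caminata caminatas calcula_max out) := by unfold Spec_long_caminata; infer_instance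

-- ===== CLAIM (what is proved, stated in full; the proofs are below) =====
def Claim_equal_long_caminata : Prop := ∀ (caminatas : List (List Int)) (calcula_max : Bool), Dom_long_caminata caminatas calcula_max → Pre_long_caminata caminatas calcula_max → Spec_long_caminata caminatas calcula_max (long_caminata caminatas calcula_max)

-- ===== LEMMAS AND PROOFS =====

-- the peak of a walk, as both ports compute it
def pvPeak (c : List Int) : Int := (PySem.List.max? (c.map (fun e => |e|)) (fun x => x)).getD 0

lemma pvPeak_nonneg (c : List Int) : 0 ≤ pvPeak c := by
  unfold pvPeak
  cases h : PySem.List.max? (c.map (fun e => |e|)) (fun x => x) with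
  | none => simp
  | some m =>
    have hm := PySem.List.max?_mem h
    simp only [List.mem_map] at hm
    obtain ⟨e, _, rfl⟩ := hm
    simp [abs_nonneg e]

-- A's running-max step / running-min step
def pvStepMax : Int × Int → Int × Int → Int × Int :=
  fun st pr => if pr.2 ≥ st.2 then (pr.1, pr.2) else st
def pvStepMin : Int × Int → Int × Int → Int × Int :=
  fun st pr => if pr.1 = 0 then (st.1, pr.2) else if pr.2 < st.2 then (pr.1, pr.2) else st

lemma pvEnumMap {α β : Type} (f : α → β) (xs : List α) (s : Int) :
    PySem.List.enumerate (xs.map f) s = (PySem.List.enumerate xs s).map (fun p => (p.1, f p.2)) := by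
  induction xs generalizing s with
  | nil => simp [PySem.List.enumerate_nil]
  | cons x t ih => simp [PySem.List.enumerate_cons, ih]

lemma pvEnumAppend {α : Type} (xs : List α) (x : α) (s : Int) :
    PySem.List.enumerate (xs ++ [x]) s = PySem.List.enumerate xs s ++ [(s + xs.length, x)] := by
  induction xs generalizing s with
  | nil => simp [PySem.List.enumerate_nil, PySem.List.enumerate_cons]
  | cons y t ih =>
    simp only [List.cons_append, PySem.List.enumerate_cons, ih, List.length_cons]
    have : s + 1 + (t.length : Int) = s + ((t.length + 1 : Nat) : Int) := by push_cast; ring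
    rw [this]

-- A's max-tracking fold over the enumerated peaks = (n - 1 - first index of max(p) in p.reverse, max(p))
lemma pvMaxChar (p : List Int) (hne : p ≠ []) (h0 : ∀ x ∈ p, 0 ≤ x) :
    List.foldl pvStepMax ((0 : Int), (0 : Int)) (PySem.List.enumerate p)
      = ((p.length : Int) - 1 - (((PySem.List.index? p.reverse ((PySem.List.max? p (fun x => x)).getD 0)).getD 0 : Nat) : Int),
         (PySem.List.max? p (fun x => x)).getD 0) := by
  induction p using List.reverseRecOn with
  | nil => exact absurd rfl hne
  | append_singleton l v ih =>
    rw [pvEnumAppend, List.foldl_append]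
    cases l with
    | nil =>
      simp only [PySem.List.enumerate_nil, List.foldl_nil, List.foldl_cons, pvStepMax,
        List.nil_append, List.reverse_singleton, PySem.List.max?_id_cons, List.foldl_nil]
      rw [if_pos (h0 v (by simp))]
      simp
    | cons h t =>
      have hl0 : ∀ x ∈ h :: t, 0 ≤ x := fun x hx => h0 x (List.mem_append_left _ hx)
      have ihv := ih (by simp) hl0
      set Ml : Int := (PySem.List.max? (h :: t) (fun x => x)).getD 0 with hMl
      have hMfold : Ml = t.foldl max h := by rw [hMl, PySem.List.max?_id_cons]; rfl
      have hMlmem : Ml ∈ h :: t := by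
        rw [hMfold]; exact PySem.List.max?_mem (PySem.List.max?_id_cons h t)
      have hMapp : (PySem.List.max? ((h :: t) ++ [v]) (fun x => x)).getD 0 = max Ml v := by
        rw [List.cons_append, PySem.List.max?_id_cons, List.foldl_append, hMfold]; rfl
      simp only [List.foldl_cons, List.foldl_nil]
      rw [ihv]
      have hstep : ∀ (a i : Int), pvStepMax (a, Ml) (i, v) = if v ≥ Ml then (i, v) else (a, Ml) := fun a i => rfl
      rw [hstep]
      by_cases hcmp : v ≥ Ml
      · have hmaxv : max Ml v = v := max_eq_right hcmp
        rw [if_pos hcmp, hMapp, hmaxv]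
        rw [List.reverse_append, List.reverse_singleton, List.singleton_append,
          PySem.List.index?_cons_self]
        simp
      · simp only [ge_iff_le, not_le] at hcmp
        have hmaxv : max Ml v = Ml := max_eq_left (le_of_lt hcmp)
        rw [if_neg (not_le.mpr hcmp), hMapp, hmaxv]
        rw [List.reverse_append, List.reverse_singleton, List.singleton_append,
          PySem.List.index?_cons_of_ne _ (ne_of_lt hcmp)]
        have hmemrev : Ml ∈ (h :: t).reverse := List.mem_reverse.mpr hMlmem
        obtain ⟨k, hk⟩ := Option.isSome_iff_exists.mp (Iff.mpr (PySem.List.index?_isSome_iff _ _) hmemrev)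
        rw [hk]
        simp only [Option.map_some, Option.getD_some, List.length_append, List.length_cons]
        push_cast
        simp

-- A's min-tracking fold over the enumerated tail (indices ≥ 1): either some later peak beats kb
-- (then: first index of the minimum, offset by s) or the state is unchanged.
lemma pvMinLoop (t : List Int) : ∀ (s : Int) (b kb : Int), 1 ≤ s →
    List.foldl pvStepMin (b, kb) (PySem.List.enumerate t s)
      = if t = [] then (b, kb)
        else if (PySem.List.min? t (fun x => x)).getD 0 < kb
        then (s + (((PySem.List.index? t ((PySem.List.min? t (fun x => x)).getD 0)).getD 0 : Nat) : Int),
              (PySem.List.min? t (fun x => x)).getD 0)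
        else (b, kb) := by
  induction t with
  | nil => intro s b kb _; simp [PySem.List.enumerate_nil]
  | cons x t' ih =>
    intro s b kb hs
    rw [PySem.List.enumerate_cons, List.foldl_cons]
    have hs0 : ¬ ((s, x).1 = 0) := by simp; omega
    have hstep : pvStepMin (b, kb) (s, x) = if x < kb then (s, x) else (b, kb) := by
      simp [pvStepMin, hs0]
    rw [hstep]
    have ihv : ∀ b' kb', List.foldl pvStepMin (b', kb') (PySem.List.enumerate t' (s + 1))
        = if t' = [] then (b', kb')
          else if (PySem.List.min? t' (fun x => x)).getD 0 < kb'
          then (s + 1 + (((PySem.List.index? t' ((PySem.List.min? t' (fun x => x)).getD 0)).getD 0 : Nat) : Int),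
                (PySem.List.min? t' (fun x => x)).getD 0)
          else (b', kb') := fun b' kb' => ih (s + 1) b' kb' (by omega)
    cases t' with
    | nil =>
      simp only [PySem.List.enumerate_nil, List.foldl_nil]
      by_cases hx : x < kb
      · rw [if_pos hx, if_neg (by simp), PySem.List.min?_id_cons]
        simp [hx]
      · rw [if_neg hx, if_neg (by simp), PySem.List.min?_id_cons]
        simp [hx]
    | cons y t'' =>
      set m' : Int := (PySem.List.min? (y :: t'') (fun x => x)).getD 0 with hm'
      have hm'fold : m' = t''.foldl min y := by rw [hm', PySem.List.min?_id_cons]; rfl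
      have hm'mem : m' ∈ y :: t'' := by
        rw [hm'fold]; exact PySem.List.min?_mem (PySem.List.min?_id_cons y t'')
      have hmcons : (PySem.List.min? (x :: y :: t'') (fun x => x)).getD 0 = min x m' := by
        rw [PySem.List.min?_id_cons]
        simp only [Option.getD_some, List.foldl_cons, hm'fold]
        rw [List.foldl_assoc]
      by_cases hx : x < kb
      · rw [if_pos hx, ihv, if_neg (show ¬(y :: t'' = []) by simp)]
        by_cases hm : m' < x
        · rw [if_pos hm, if_neg (show ¬(x :: y :: t'' = []) by simp), hmcons,
            min_eq_right (le_of_lt hm), if_pos (lt_trans hm hx)]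
          rw [PySem.List.index?_cons_of_ne _ (ne_of_gt hm)]
          obtain ⟨k, hk⟩ := Option.isSome_iff_exists.mp (Iff.mpr (PySem.List.index?_isSome_iff _ _) hm'mem)
          rw [hk]
          simp only [Option.map_some, Option.getD_some]
          push_cast; ring_nf
        · rw [if_neg hm, if_neg (show ¬(x :: y :: t'' = []) by simp), hmcons,
            min_eq_left (not_lt.mp hm), if_pos hx, PySem.List.index?_cons_self]
          simp
      · rw [if_neg hx, ihv, if_neg (show ¬(y :: t'' = []) by simp)]
        by_cases hm : m' < kb
        · rw [if_pos hm, if_neg (show ¬(x :: y :: t'' = []) by simp), hmcons]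
          have hmx : m' < x := lt_of_lt_of_le hm (not_lt.mp hx)
          rw [min_eq_right (le_of_lt hmx), if_pos hm,
            PySem.List.index?_cons_of_ne _ (ne_of_gt hmx)]
          obtain ⟨k, hk⟩ := Option.isSome_iff_exists.mp (Iff.mpr (PySem.List.index?_isSome_iff _ _) hm'mem)
          rw [hk]
          simp only [Option.map_some, Option.getD_some]
          push_cast; ring_nf
        · rw [if_neg hm, if_neg (show ¬(x :: y :: t'' = []) by simp), hmcons]
          rw [if_neg (by rcases min_choice x m' with h | h <;> rw [h] <;> omega)]

-- ===== VERDICT (by name: the statement is the Claim_ definition above) =====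
theorem long_caminata_spec : Claim_equal_long_caminata := by
  intro caminatas calcula_max _ _
  unfold Spec_long_caminata long_caminata long_caminata_alt
  cases caminatas with
  | nil => cases calcula_max <;> simp [PySem.List.enumerate]
  | cons c cs =>
    have hpkne : (c :: cs).map (fun cc => (PySem.List.max? (cc.map (fun e => |e|)) (fun x => x)).getD 0) ≠ [] := by simp
    rw [if_neg hpkne]
    set peaks := (c :: cs).map (fun cc => (PySem.List.max? (cc.map (fun e => |e|)) (fun x => x)).getD 0) with hpeaks
    have hpeaks' : peaks = (c :: cs).map pvPeak := by rw [hpeaks]; rfl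
    have hp0 : ∀ x ∈ peaks, 0 ≤ x := by
      rw [hpeaks']; intro x hx
      obtain ⟨cc, _, rfl⟩ := List.mem_map.mp hx
      exact pvPeak_nonneg cc
    have henum : PySem.List.enumerate peaks
        = (PySem.List.enumerate (c :: cs)).map (fun p => (p.1, pvPeak p.2)) := by
      rw [hpeaks']; exact pvEnumMap pvPeak (c :: cs) 0
    cases calcula_max with
    | true =>
      rw [if_pos rfl]
      have hA : List.foldl (fun (st : Int × Int) (p : Int × List Int) =>
            let cam := p.2.map (fun elemento => |elemento|)
            let m := (PySem.List.max? cam (fun x => x)).getD 0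
            if true = true then
              if m ≥ st.2 then (p.1, m) else st
            else if p.1 = 0 then (st.1, m)
            else if m < st.2 then (p.1, m) else st)
          ((0 : Int), (0 : Int)) (PySem.List.enumerate (c :: cs))
          = List.foldl pvStepMax ((0 : Int), (0 : Int)) (PySem.List.enumerate peaks) := by
        rw [henum, List.foldl_map]; rfl
      rw [hA, pvMaxChar peaks (by rw [hpeaks]; simp) hp0,
        PySem.List.slice?_none_none_neg_one]
      rfl
    | false =>
      rw [if_neg (by simp)]
      have hA : List.foldl (fun (st : Int × Int) (p : Int × List Int) =>
            let cam := p.2.map (fun elemento => |elemento|)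
            let m := (PySem.List.max? cam (fun x => x)).getD 0
            if false = true then
              if m ≥ st.2 then (p.1, m) else st
            else if p.1 = 0 then (st.1, m)
            else if m < st.2 then (p.1, m) else st)
          ((0 : Int), (0 : Int)) (PySem.List.enumerate (c :: cs))
          = List.foldl pvStepMin ((0 : Int), (0 : Int)) (PySem.List.enumerate peaks) := by
        rw [henum, List.foldl_map]; rfl
      rw [hA]
      have hpk : peaks = pvPeak c :: cs.map pvPeak := by rw [hpeaks']; rfl
      rw [hpk, PySem.List.enumerate_cons, List.foldl_cons]
      have hfirst : pvStepMin ((0 : Int), (0 : Int)) ((0 : Int), pvPeak c) = ((0 : Int), pvPeak c) := by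
        simp [pvStepMin]
      rw [hfirst, pvMinLoop (cs.map pvPeak) (0 + 1) 0 (pvPeak c) (by norm_num)]
      cases hcs : cs.map pvPeak with
      | nil =>
        rw [if_pos rfl]
        rw [PySem.List.min?_id_cons]
        simp
      | cons y t =>
        rw [if_neg (by simp)]
        set m' : Int := (PySem.List.min? (y :: t) (fun x => x)).getD 0 with hm'
        have hm'fold : m' = t.foldl min y := by rw [hm', PySem.List.min?_id_cons]; rfl
        have hm'mem : m' ∈ y :: t := by
          rw [hm'fold]; exact PySem.List.min?_mem (PySem.List.min?_id_cons y t)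
        have hmcons : (PySem.List.min? (pvPeak c :: y :: t) (fun x => x)).getD 0 = min (pvPeak c) m' := by
          rw [PySem.List.min?_id_cons]
          simp only [Option.getD_some, List.foldl_cons, hm'fold]
          rw [List.foldl_assoc]
        by_cases hm : m' < pvPeak c
        · rw [if_pos hm]
          rw [hmcons, min_eq_right (le_of_lt hm),
            PySem.List.index?_cons_of_ne _ (ne_of_gt hm)]
          obtain ⟨k, hk⟩ := Option.isSome_iff_exists.mp (Iff.mpr (PySem.List.index?_isSome_iff _ _) hm'mem)
          rw [hk]
          simp only [Option.map_some, Option.getD_some]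
          push_cast; ring
        · rw [if_neg hm]
          rw [hmcons, min_eq_left (not_lt.mp hm), PySem.List.index?_cons_self]
          simp
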